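-- pv_equiv track=rewrite | github.com/CrapTheCoder/Competitive-Programming | CodeForces/PyPy 3/1285D | Dr. Evil Underscores/75221041.py | solve
-- ===== SOURCE A (Python) =====
-- def solve(a, b=32):
--     if b == -1:
--         return 0
--
--     a1 = []
--     a2 = []
--
--     n = len(a)
--
--     for i in range(n):
--         if (a[i] // (2 ** b)) % 2 == 1:
--             a1.append(a[i])
--         else:
--             a2.append(a[i])
--
--     if len(a1) == 0:
--         return solve(a2, b - 1)
--
--     elif len(a2) == 0:
--         return solve(a1, b - 1)
--
--     else:
--         return 2 ** b + min(solve(a1, b - 1), solve(a2, b - 1))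
-- ===== SOURCE B (Python) =====
-- def solve(a, b=32):
--     # Build an explicit binary trie of the bits b..0 of each number,
--     # then one DFS over the trie computes the minimal worst-case XOR.
--     root = [None, None]
--     for x in a:
--         node = root
--         for i in range(b, -1, -1):
--             bit = (x >> i) & 1
--             if node[bit] is None:
--                 node[bit] = [None, None]
--             node = node[bit]
--
--     def dfs(node, bit):
--         if bit < 0:
--             return 0
--         c0, c1 = node
--         if c1 is None:
--             return dfs(c0, bit - 1) if c0 is not None else 0
--         if c0 is None:
--             return dfs(c1, bit - 1)
--         return (1 << bit) + min(dfs(c0, bit - 1), dfs(c1, bit - 1))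
--
--     return dfs(root, b)
-- ===== Notes on version B (the rewrite author's own statement) =====
-- stated objective: alternative
-- what changed: A repeatedly partitions the number list into two sublists per bit level of its divide-and-conquer recursion; B instead builds one explicit binary trie of the bits b..0 of all numbers and computes the answer with a single DFS over the trie nodes.
import Mathlib
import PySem

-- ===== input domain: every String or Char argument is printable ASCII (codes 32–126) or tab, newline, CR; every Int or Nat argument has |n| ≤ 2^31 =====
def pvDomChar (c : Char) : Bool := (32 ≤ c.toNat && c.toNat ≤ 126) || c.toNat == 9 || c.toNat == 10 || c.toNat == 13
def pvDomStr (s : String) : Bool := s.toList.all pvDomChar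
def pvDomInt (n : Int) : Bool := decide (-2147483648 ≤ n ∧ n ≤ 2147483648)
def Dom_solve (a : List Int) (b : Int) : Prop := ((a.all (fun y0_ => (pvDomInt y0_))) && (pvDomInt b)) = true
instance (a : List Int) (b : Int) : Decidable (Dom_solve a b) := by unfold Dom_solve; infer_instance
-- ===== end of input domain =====

-- B replaces A's recursive list partitioning by one explicit binary trie built once,
-- followed by a single DFS over the trie (alternative decomposition, same asymptotic cost).

-- ===== PORT A =====
-- A's loop test "(a[i] // (2 ** b)) % 2 == 1", with Python's floor // and %.
def bitp (x : Int) (k : Nat) : Bool := PySem.Int.mod (PySem.Int.floordiv x ((2 : Int) ^ k)) 2 == 1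

-- A recurses on b down to -1; we transcribe it with fuel (b+1).toNat, so that at
-- fuel k+1 the Python bit index b equals k (exact for every b ≥ -1; for b < -1 the
-- Python recursion never terminates, excluded by Pre_solve).
def solveGo : List Int → Nat → Int
  | _, 0 => 0                                     -- b == -1: return 0
  | a, k + 1 =>
    -- the loop appending each a[i] to a1 (bit set) or a2 (bit clear), in order
    let a1 := a.filter (fun x => bitp x k)
    let a2 := a.filter (fun x => !bitp x k)
    if a1.length = 0 then solveGo a2 k
    else if a2.length = 0 then solveGo a1 k
    else (2 : Int) ^ k + min (solveGo a1 k) (solveGo a2 k)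

def solve (a : List Int) (b : Int) : Int := solveGo a (b + 1).toNat

-- ===== PORT B =====
-- Trie.nil models Python's None; Trie.node c0 c1 models the node list [c0, c1].
inductive Trie
  | nil : Trie
  | node : Trie → Trie → Trie
deriving DecidableEq, Repr

-- "if node[bit] is None: node[bit] = [None, None]"
def Trie.orEmpty : Trie → Trie
  | .nil => .node .nil .nil
  | t => t

-- the inner "for i in range(b, -1, -1)" loop of one insertion; fuel k+1 means i = k.
-- Python's "(x >> i) & 1" is ported as PySem.Int.band (x >>> i) 1 (exact, see PYSEM.md).
def Trie.insertBits : Trie → Int → Nat → Trie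
  | t, _, 0 => t
  | t, x, k + 1 =>
    match t with
    | .nil => .nil                                -- unreachable: insertion starts at the root node
    | .node c0 c1 =>
      if PySem.Int.band (x >>> k) 1 == 1 then .node c0 (Trie.insertBits c1.orEmpty x k)
      else .node (Trie.insertBits c0.orEmpty x k) c1

-- dfs(node, bit), with fuel k+1 meaning bit = k (fuel 0 is "bit < 0: return 0");
-- Python's "1 << bit" is (1 : Int) <<< k.
def Trie.dfs : Trie → Nat → Int
  | _, 0 => 0
  | .nil, _ + 1 => 0
  | .node .nil .nil, _ + 1 => 0                   -- c1 is None and c0 is None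
  | .node c0 .nil, k + 1 => c0.dfs k              -- c1 is None
  | .node .nil c1, k + 1 => c1.dfs k              -- c0 is None
  | .node c0 c1, k + 1 => (1 : Int) <<< k + min (c0.dfs k) (c1.dfs k)

def solve_alt (a : List Int) (b : Int) : Int :=
  let n := (b + 1).toNat                          -- number of bit positions b .. 0
  let root := a.foldl (fun t x => Trie.insertBits t x n) (Trie.node .nil .nil)
  root.dfs n

-- ===== PRECONDITION & SPEC =====
-- Pre_ excludes b < -1, where Python A recurses forever on b-1 (RecursionError), and b > 995,
-- where A's recursion depth b+2 exceeds CPython's default recursion limit of 1000 and A raises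
-- RecursionError before returning.
def Pre_solve (a : List Int) (b : Int) : Prop := -1 ≤ b ∧ b ≤ 995
instance (a : List Int) (b : Int) : Decidable (Pre_solve a b) := by unfold Pre_solve; infer_instance
def pvWitness_solve : List Int × Int := ([3, 10, 5], 32)

def Spec_solve (a : List Int) (b : Int) (out : Int) : Prop := out = solve_alt a b
instance (a : List Int) (b : Int) (out : Int) : Decidable (Spec_solve a b out) := by unfold Spec_solve; infer_instance

-- ===== CLAIM (what is proved, stated in full; the proofs are below) =====
def Claim_equal_solve : Prop := ∀ (a : List Int) (b : Int), Dom_solve a b → Pre_solve a b → Spec_solve a b (solve a b)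

-- ===== LEMMAS AND PROOFS =====

-- B's bit test equals A's: (x >> k) & 1 = (x // 2^k) % 2 (Python's >> floors).
theorem bit_eq (x : Int) (k : Nat) :
    (PySem.Int.band (x >>> k) 1 == 1) = bitp x k := by
  unfold bitp
  have h2 : (2 : Int) ^ k = ((2 ^ k : Nat) : Int) := by push_cast; ring
  rw [PySem.Int.band_one, Int.shiftRight_eq_div_pow, h2,
    PySem.Int.floordiv_eq_ediv_of_pos (by positivity : (0:Int) < ((2 ^ k : Nat) : Int))]

-- one insertion step as seen from a child: descend with orEmpty
def step (k : Nat) (t : Trie) (x : Int) : Trie := Trie.insertBits t.orEmpty x k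

def isNode : Trie → Prop
  | .nil => False
  | .node _ _ => True

theorem insertBits_node (k : Nat) (c0 c1 : Trie) (x : Int) :
    isNode (Trie.insertBits (.node c0 c1) x k) := by
  cases k with
  | zero => simp [Trie.insertBits, isNode]
  | succ k => simp only [Trie.insertBits]; split <;> simp [isNode]

theorem orEmpty_of_isNode {t : Trie} (h : isNode t) : t.orEmpty = t := by
  cases t with
  | nil => exact absurd h (by simp [isNode])
  | node c0 c1 => rfl

theorem foldl_step_of_isNode (k : Nat) (l : List Int) :
    ∀ (t : Trie), isNode t →
      l.foldl (step k) t = l.foldl (fun t x => Trie.insertBits t x k) t := by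
  induction l with
  | nil => intro t _; rfl
  | cons x l ih =>
    intro t ht
    cases t with
    | nil => exact absurd ht (by simp [isNode])
    | node c0 c1 =>
      simp only [List.foldl_cons, step, orEmpty_of_isNode ht]
      exact ih _ (insertBits_node k c0 c1 x)

-- the splitting lemma: one level of insertion distributes over the two children
theorem foldl_insert_split (k : Nat) (l : List Int) :
    ∀ (c0 c1 : Trie),
      l.foldl (fun t x => Trie.insertBits t x (k + 1)) (.node c0 c1)
        = .node ((l.filter (fun x => !bitp x k)).foldl (step k) c0)
                ((l.filter (fun x => bitp x k)).foldl (step k) c1) := by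
  induction l with
  | nil => intro c0 c1; rfl
  | cons x l ih =>
    intro c0 c1
    by_cases h : bitp x k
    · have hb : (PySem.Int.band (x >>> k) 1 == 1) = true := by rw [bit_eq]; exact h
      have hins : Trie.insertBits (.node c0 c1) x (k + 1) = .node c0 (step k c1 x) := by
        simp [Trie.insertBits, hb, step]
      simp [h, List.foldl_cons, hins, ih]
    · have h' : bitp x k = false := by simpa using h
      have hb : (PySem.Int.band (x >>> k) 1 == 1) = false := by rw [bit_eq]; exact h'
      have hins : Trie.insertBits (.node c0 c1) x (k + 1) = .node (step k c0 x) c1 := by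
        simp [Trie.insertBits, hb, step]
      simp [h', List.foldl_cons, hins, ih]

def build (l : List Int) (k : Nat) : Trie := l.foldl (step k) Trie.nil

theorem build_cons_eq (k : Nat) (x : Int) (l : List Int) :
    build (x :: l) k = (x :: l).foldl (fun t x => Trie.insertBits t x k) (.node .nil .nil) := by
  simp only [build, List.foldl_cons, step, Trie.orEmpty]
  exact foldl_step_of_isNode k l _ (insertBits_node k .nil .nil x)

theorem build_cons_split (k : Nat) (x : Int) (l : List Int) :
    build (x :: l) (k + 1)
      = .node (build ((x :: l).filter (fun x => !bitp x k)) k)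
              (build ((x :: l).filter (fun x => bitp x k)) k) := by
  rw [build_cons_eq, foldl_insert_split]; rfl

theorem build_isNode (k : Nat) (x : Int) (l : List Int) : isNode (build (x :: l) k) := by
  rw [build_cons_eq]
  simp only [List.foldl_cons]
  rw [← foldl_step_of_isNode k l _ (insertBits_node k .nil .nil x)]
  generalize hstart : Trie.insertBits (.node .nil .nil) x k = t0
  have h0 : isNode t0 := hstart ▸ insertBits_node k .nil .nil x
  clear hstart
  induction l generalizing t0 with
  | nil => exact h0
  | cons y l ih =>
    cases t0 with
    | nil => exact absurd h0 (by simp [isNode])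
    | node c0 c1 =>
      simp only [List.foldl_cons, step, orEmpty_of_isNode h0]
      exact ih _ (insertBits_node k c0 c1 y)

theorem solveGo_nil : ∀ k : Nat, solveGo [] k = 0 := by
  intro k
  induction k with
  | zero => rfl
  | succ k ih => simp [solveGo, ih]

theorem filter_both_nil {p : Int → Bool} {l : List Int}
    (h1 : l.filter p = []) (h2 : l.filter (fun x => !p x) = []) : l = [] := by
  cases l with
  | nil => rfl
  | cons x l =>
    by_cases h : p x
    · simp [h] at h1
    · simp [h] at h2

-- main invariant: DFS of the trie built at fuel k computes A's recursion at fuel k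
theorem dfs_build (k : Nat) : ∀ l : List Int, (build l k).dfs k = solveGo l k := by
  induction k with
  | zero =>
    intro l
    have h0 : solveGo l 0 = 0 := rfl
    cases build l 0 <;> simp [Trie.dfs, h0]
  | succ k ih =>
    intro l
    cases l with
    | nil => simp [build, Trie.dfs, solveGo_nil]
    | cons x l' =>
      rw [build_cons_split]
      have hRHS : solveGo (x :: l') (k + 1)
          = (if ((x :: l').filter (fun x => bitp x k)).length = 0
               then solveGo ((x :: l').filter (fun x => !bitp x k)) k
             else if ((x :: l').filter (fun x => !bitp x k)).length = 0
               then solveGo ((x :: l').filter (fun x => bitp x k)) k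
             else (2 : Int) ^ k
               + min (solveGo ((x :: l').filter (fun x => bitp x k)) k)
                     (solveGo ((x :: l').filter (fun x => !bitp x k)) k)) := rfl
      rw [hRHS]
      set a1 := (x :: l').filter (fun x => bitp x k) with ha1
      set a2 := (x :: l').filter (fun x => !bitp x k) with ha2
      have hsum : ¬(a1 = [] ∧ a2 = []) := by
        rintro ⟨h1, h2⟩
        exact absurd (filter_both_nil h1 h2) (by simp)
      by_cases h1 : a1 = []
      · have h2 : a2 ≠ [] := fun h2 => hsum ⟨h1, h2⟩
        obtain ⟨y, a2', hy⟩ := List.exists_cons_of_ne_nil h2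
        have hn : isNode (build a2 k) := hy ▸ build_isNode k y a2'
        rw [h1]
        cases hb : build a2 k with
        | nil => rw [hb] at hn; exact absurd hn (by simp [isNode])
        | node c0 c1 =>
          have t2 := ih a2
          rw [hb] at t2
          simp [build, Trie.dfs, t2]
      · by_cases h2 : a2 = []
        · obtain ⟨y, a1', hy⟩ := List.exists_cons_of_ne_nil h1
          have hn : isNode (build a1 k) := hy ▸ build_isNode k y a1'
          rw [h2]
          cases hb : build a1 k with
          | nil => rw [hb] at hn; exact absurd hn (by simp [isNode])
          | node c0 c1 =>
            have t1 := ih a1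
            rw [hb] at t1
            have hl1 : a1.length ≠ 0 := by simp [hy]
            simp [build, Trie.dfs, t1, hl1]
        · obtain ⟨y, a1', hy1⟩ := List.exists_cons_of_ne_nil h1
          obtain ⟨z, a2', hy2⟩ := List.exists_cons_of_ne_nil h2
          have hn1 : isNode (build a1 k) := hy1 ▸ build_isNode k y a1'
          have hn2 : isNode (build a2 k) := hy2 ▸ build_isNode k z a2'
          cases hb1 : build a1 k with
          | nil => rw [hb1] at hn1; exact absurd hn1 (by simp [isNode])
          | node d0 d1 =>
            cases hb2 : build a2 k with
            | nil => rw [hb2] at hn2; exact absurd hn2 (by simp [isNode])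
            | node e0 e1 =>
              have t1 := ih a1; rw [hb1] at t1
              have t2 := ih a2; rw [hb2] at t2
              have hl1 : a1.length ≠ 0 := by simp [hy1]
              have hl2 : a2.length ≠ 0 := by simp [hy2]
              have hsh : (1 : Int) <<< k = (2 : Int) ^ k := by rw [Int.shiftLeft_eq]; ring
              simp only [Trie.dfs, hl1, hl2, if_false, t1, t2, hsh]
              rw [min_comm]

-- ===== VERDICT (by name: the statement is the Claim_ definition above) =====
theorem solve_spec : Claim_equal_solve := by
  intro a b _ _
  unfold Spec_solve solve solve_alt
  cases a with
  | nil =>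
    -- empty list: A returns 0 after its trivial recursion; B's dfs of [None, None] is 0
    cases (b + 1).toNat <;> simp [solveGo_nil, Trie.dfs]
  | cons x l =>
    have h := dfs_build (b + 1).toNat (x :: l)
    rw [build_cons_eq] at h
    exact h.symm
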